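-- pv_equiv track=rewrite | github.com/wenima/codewars | kyu5/src/find_sum.py | make_node_matrix
-- ===== SOURCE A (Python) =====
-- def make_node_matrix(matrix):
--     """Convert input matrix to matrix of tuples with node name and value to be
--     input into function to convert to graph. Values are inverted for input
--     into shortest path algorithm."""
--     node_names = ['n{0}'.format(p) for p in range(1, len(matrix)**2 + 1)]
--     nodes = zip(node_names, [ -n for row in matrix for n in row])
--     node_matrix = []
--     for i in range(len(matrix)):
--         sub_list = []
--         for idx, t in enumerate(nodes):
--             sub_list.append(t)
--             if idx == len(matrix) - 1:
--                 break
--         node_matrix.append(sub_list)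
--     return node_matrix
-- ===== SOURCE B (Python) =====
-- def make_node_matrix(matrix):
--     """Convert input matrix to matrix of tuples with node name and value to be
--     input into function to convert to graph. Values are inverted for input
--     into shortest path algorithm."""
--     n = len(matrix)
--     flat = [-v for row in matrix for v in row]
--     names = ['n{}'.format(i + 1) for i in range(n * n)]
--     pairs = list(zip(names, flat))
--     return [pairs[i * n:(i + 1) * n] for i in range(n)]
-- ===== Notes on version B (the rewrite author's own statement) =====
-- stated objective: simpler
-- what changed: A consumes a shared zip iterator with a nested enumerate-and-break loop to cut chunks; B builds the pair list once and returns positional slices pairs[i*n:(i+1)*n], removing the stateful iterator and inner loop.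
import Mathlib
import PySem

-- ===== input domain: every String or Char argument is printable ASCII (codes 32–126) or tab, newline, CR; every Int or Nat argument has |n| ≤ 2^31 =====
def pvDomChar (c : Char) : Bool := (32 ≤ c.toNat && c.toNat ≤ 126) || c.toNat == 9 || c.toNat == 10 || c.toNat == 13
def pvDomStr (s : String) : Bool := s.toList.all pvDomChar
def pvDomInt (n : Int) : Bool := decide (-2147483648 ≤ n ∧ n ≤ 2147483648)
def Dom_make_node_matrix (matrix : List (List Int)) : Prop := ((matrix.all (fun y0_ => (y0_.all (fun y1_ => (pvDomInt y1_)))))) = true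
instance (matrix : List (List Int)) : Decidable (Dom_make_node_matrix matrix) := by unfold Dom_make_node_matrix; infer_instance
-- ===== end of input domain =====

-- B replaces A's shared-iterator chunking (nested enumerate-and-break) by positional slicing of a pair list built once; objective: simpler.


-- ===== PORT A =====
-- inner loop of A: consume up to k items from the shared iterator `nodes`
-- (for idx, t in enumerate(nodes): append t; if idx == len(matrix)-1: break)
def pvConsume : Nat → List (String × Int) → List (String × Int) × List (String × Int)
  | _, [] => ([], [])
  | 0, xs => ([], xs)
  | k + 1, x :: xs =>
      let p := pvConsume k xs
      (x :: p.1, p.2)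

def make_node_matrix (matrix : List (List Int)) : List (List (String × Int)) :=
  let node_names := (PySem.List.pyRange 1 ((matrix.length : Int) ^ 2 + 1) 1).map
    (fun p => "n" ++ PySem.Int.toStr p)
  let nodes := node_names.zip (matrix.flatMap (fun row => row.map (fun v => -v)))
  let st := (List.range matrix.length).foldl
    (fun (st : List (String × Int) × List (List (String × Int))) (_ : Nat) =>
      let p := pvConsume matrix.length st.1
      (p.2, st.2 ++ [p.1]))
    (nodes, [])
  st.2

-- ===== PORT B =====
def make_node_matrix_alt (matrix : List (List Int)) : List (List (String × Int)) :=
  let n := matrix.length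
  let flat := matrix.flatMap (fun row => row.map (fun v => -v))
  let names := (List.range (n * n)).map (fun (i : Nat) => "n" ++ PySem.Int.toStr ((i : Int) + 1))
  let pairs := names.zip flat
  (List.range n).map (fun (i : Nat) => PySem.List.slice pairs (some ((i : Int) * (n : Int))) (some (((i : Int) + 1) * (n : Int))))

-- ===== PRECONDITION & SPEC =====
def Spec_make_node_matrix (matrix : List (List Int)) (out : List (List (String × Int))) : Prop := out = make_node_matrix_alt matrix
instance (matrix : List (List Int)) (out : List (List (String × Int))) : Decidable (Spec_make_node_matrix matrix out) := by unfold Spec_make_node_matrix; infer_instance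

-- ===== CLAIM (what is proved, stated in full; the proofs are below) =====
def Claim_equal_make_node_matrix : Prop := ∀ (matrix : List (List Int)), Dom_make_node_matrix matrix → Spec_make_node_matrix matrix (make_node_matrix matrix)

-- ===== LEMMAS AND PROOFS =====

lemma pvConsume_eq (k : Nat) (xs : List (String × Int)) :
    pvConsume k xs = (xs.take k, xs.drop k) := by
  induction k generalizing xs with
  | zero => cases xs <;> simp [pvConsume]
  | succ k ih => cases xs <;> simp [pvConsume, ih]

lemma pvChunkFold (n : Nat) : ∀ (m : Nat) (xs : List (String × Int)) (acc : List (List (String × Int))),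
    (List.range m).foldl
      (fun (st : List (String × Int) × List (List (String × Int))) (_ : Nat) =>
        (st.1.drop n, st.2 ++ [st.1.take n])) (xs, acc)
    = (xs.drop (m * n), acc ++ (List.range m).map (fun i => (xs.drop (i * n)).take n)) := by
  intro m
  induction m with
  | zero => simp
  | succ m ih =>
      intro xs acc
      rw [List.range_succ, List.foldl_append, ih]
      have h1 : (m + 1) * n = m * n + n := by ring
      simp [List.drop_drop, h1]

lemma pvNames_eq (n : Nat) :
    (PySem.List.pyRange 1 ((n : Int) ^ 2 + 1) 1).map (fun p => "n" ++ PySem.Int.toStr p)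
    = (List.range (n * n)).map (fun (i : Nat) => "n" ++ PySem.Int.toStr ((i : Int) + 1)) := by
  rw [PySem.List.pyRange_one, List.map_map]
  have h : (((n : Int) ^ 2 + 1) - 1).toNat = n * n := by
    have : ((n : Int) ^ 2 + 1) - 1 = ((n * n : Nat) : Int) := by push_cast; ring
    rw [this, Int.toNat_natCast]
  rw [h]
  apply List.map_congr_left
  intro i _
  simp only [Function.comp_apply]
  have : (1 : Int) + i = (i : Int) + 1 := by ring
  rw [this]

-- ===== VERDICT (by name: the statement is the Claim_ definition above) =====
theorem make_node_matrix_spec : Claim_equal_make_node_matrix := by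
  intro matrix _
  unfold Spec_make_node_matrix make_node_matrix make_node_matrix_alt
  simp only [pvConsume_eq, pvNames_eq]
  rw [pvChunkFold]
  simp only [List.nil_append]
  apply List.map_congr_left
  intro i hi
  rw [show ((i : Int) + 1) * (matrix.length : Int) = ((i : Int) * matrix.length) + (matrix.length : Int) by ring]
  rw [show ((i : Int) * (matrix.length : Int)) = ((i * matrix.length : Nat) : Int) by push_cast; ring]
  rw [PySem.List.slice_natCast_add]
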